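-- pv_equiv track=rewrite | github.com/jcfernandez-890825/checkio | src/seven-segment.py | seven_segment
-- ===== SOURCE A (Python) =====
-- from itertools import combinations, chain
--
-- def seven_segment(lit_seg, broken_seg):
--     # Use this as guide
--     # Hexadecimal encodings for displaying the digits 0 to F on https://en.wikipedia.org/wiki/Seven-segment_display
--     # Code for getting each string in uppercase
--     # from itertools import compress
--     # set(''.join(compress('ABCDEFG', list(int(i) for i in bin(int(string, 16))[2:].zfill(7)))) for string in
--     #     ('0x7E', '0x30', '0x6D', '0x79', '0x33', '0x5B', '0x5F', '0x70', '0x7F', '0x7B'))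
--     segments_display_dct = {
--         'left':  {'ACDFG', 'ABDEG', 'ABCDFG', 'ABCDEFG', 'ABCDG', 'BCFG', 'BC', 'ABC', 'ABCDEF', 'ACDEFG'},
--         'right': {'bcfg', 'acdfg', 'abcdfg', 'abdeg', 'bc', 'abcdefg', 'abcdg', 'acdefg', 'abc', 'abcdef'}
--     }
--     broken_seg_dct = {'left': '', 'right': ''}
--     lit_seg_dct = {'left': '', 'right': ''}
--
--     for segment in lit_seg:
--         # left display segments are in uppercase and right ones in lowercase
--         lit_seg_dct['left' if segment.isupper() else 'right'] += segment
--
--     for segment in broken_seg: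
--         # left display segments are in uppercase and right ones in lowercase
--         broken_seg_dct['left' if segment.isupper() else 'right'] += segment
--
--     total_possible_numbers = 1
--     for side in ('left', 'right'):
--         # Get broken segments of one side
--         broken_segments = broken_seg_dct[side]
--         # By calculating the cartesian product length of all possible numbers displayed on each display
--         # We get the total possible numbers displayed on the device
--         total_possible_numbers *= len(
--             # Check how many segment combinations are actually numbers on one display
--             set(
--                 map(
--                     lambda comb: ''.join(sorted(lit_seg_dct[side] + ''.join(comb))),
--                     # Get all broken segments possible combinations on one display
--                     chain.from_iterable(
--                         combinations(broken_segments, n) for n in range(len(broken_segments) + 1)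
--                     )
--                 )
--             ).intersection(segments_display_dct[side])
--         )
--
--     # Return the total number that the device may be displaying
--     return total_possible_numbers
-- ===== SOURCE B (Python) =====
-- # B: instead of enumerating all 2^k subsets of the broken segments, test each of the
-- # 10 valid digit patterns directly: a pattern is displayable iff the lit segments are
-- # a duplicate-free subset of it and its remaining segments are all among the broken ones.
--
-- _LEFT_PATTERNS = ('ACDFG', 'ABDEG', 'ABCDFG', 'ABCDEFG', 'ABCDG',
--                   'BCFG', 'BC', 'ABC', 'ABCDEF', 'ACDEFG')
-- _RIGHT_PATTERNS = ('bcfg', 'acdfg', 'abcdfg', 'abdeg', 'bc',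
--                    'abcdefg', 'abcdg', 'acdefg', 'abc', 'abcdef')
--
--
-- def _side_count(lit, broken, patterns):
--     lit_set = set(lit)
--     if len(lit_set) < len(lit):
--         return 0
--     return sum(1 for p in patterns
--                if lit_set <= set(p) and set(p) - lit_set <= broken)
--
--
-- def seven_segment(lit_seg, broken_seg):
--     left = _side_count([c for c in lit_seg if c.isupper()],
--                        set(c for c in broken_seg if c.isupper()),
--                        _LEFT_PATTERNS)
--     right = _side_count([c for c in lit_seg if not c.isupper()],
--                         set(c for c in broken_seg if not c.isupper()),
--                         _RIGHT_PATTERNS)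
--     return left * right
-- ===== Notes on version B (the rewrite author's own statement) =====
-- stated objective: faster
-- what changed: Instead of enumerating all 2^k subsets of the broken segments per side and intersecting the resulting set of sorted strings with the 10 valid patterns, B tests each of the 10 patterns directly: lit must be a duplicate-free subset of the pattern and the pattern's remaining segments must all be broken.
import Mathlib
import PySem

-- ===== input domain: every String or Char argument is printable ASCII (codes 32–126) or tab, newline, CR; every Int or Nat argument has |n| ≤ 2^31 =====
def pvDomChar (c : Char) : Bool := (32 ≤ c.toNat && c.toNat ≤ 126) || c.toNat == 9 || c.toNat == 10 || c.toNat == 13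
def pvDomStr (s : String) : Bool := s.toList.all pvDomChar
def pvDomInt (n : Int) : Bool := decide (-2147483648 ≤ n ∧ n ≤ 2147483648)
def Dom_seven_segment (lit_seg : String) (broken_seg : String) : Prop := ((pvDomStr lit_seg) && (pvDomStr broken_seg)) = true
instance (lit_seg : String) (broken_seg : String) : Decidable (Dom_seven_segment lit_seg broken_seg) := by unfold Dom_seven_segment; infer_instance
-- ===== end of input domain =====

-- B replaces A's enumeration of all 2^k subsets of the broken segments by a direct
-- test of each of the 10 valid digit patterns (lit ⊆ pattern ∧ pattern \ lit ⊆ broken).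

-- ===== PORT A =====
-- the ten valid segment patterns per display side (A's set literals, as sorted char lists)
def pvLeftPats : List (List Char) :=
  ["ACDFG".toList, "ABDEG".toList, "ABCDFG".toList, "ABCDEFG".toList, "ABCDG".toList,
   "BCFG".toList, "BC".toList, "ABC".toList, "ABCDEF".toList, "ACDEFG".toList]
def pvRightPats : List (List Char) :=
  ["bcfg".toList, "acdfg".toList, "abcdfg".toList, "abdeg".toList, "bc".toList,
   "abcdefg".toList, "abcdg".toList, "acdefg".toList, "abc".toList, "abcdef".toList]

-- A's per-character loop building the two-entry dict {'left': …, 'right': …} of a string,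
-- transliterated with the two accumulated strings as a pair (left = uppercase, right = rest)
def pvSplitA (cs : List Char) : List Char × List Char :=
  cs.foldl (fun p c => if PySem.Chars.isupper c then (p.1 ++ [c], p.2) else (p.1, p.2 ++ [c])) ([], [])

-- A's per-side factor: all combinations of the broken segments (chain.from_iterable over
-- n in range(len+1)), each joined with the lit segments and sorted, collected into a set,
-- intersected with the side's pattern set, and its size taken
def pvSideA (lit broken : List Char) (pats : List (List Char)) : Int :=
  let combs := (List.range (broken.length + 1)).flatMap (fun n => PySem.List.combinations broken n)
  let s : PySem.Set (List Char) :=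
    PySem.Set.ofList (combs.map (fun comb => PySem.List.sorted (lit ++ comb) (fun c => c) false))
  ((PySem.Set.inter s (PySem.Set.ofList pats)).length : Int)

def seven_segment (lit_seg : String) (broken_seg : String) : Int :=
  let lits := pvSplitA lit_seg.toList
  let brks := pvSplitA broken_seg.toList
  -- total = 1; total *= left factor; total *= right factor
  1 * pvSideA lits.1 brks.1 pvLeftPats * pvSideA lits.2 brks.2 pvRightPats

-- ===== PORT B =====
-- B's _side_count: 0 if the lit segments repeat, else the number of patterns p with
-- lit ⊆ p and p \ lit ⊆ broken
def pvSideB (lit : List Char) (broken : PySem.Set Char) (pats : List (List Char)) : Int :=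
  let litSet := PySem.Set.ofList lit
  if litSet.length < lit.length then 0
  else (pats.countP (fun p =>
    PySem.Set.issubset litSet (PySem.Set.ofList p) &&
    PySem.Set.issubset (PySem.Set.diff (PySem.Set.ofList p) litSet) broken) : Int)

def seven_segment_alt (lit_seg : String) (broken_seg : String) : Int :=
  let cs := lit_seg.toList
  let bs := broken_seg.toList
  pvSideB (cs.filter (fun c => PySem.Chars.isupper c))
      (PySem.Set.ofList (bs.filter (fun c => PySem.Chars.isupper c))) pvLeftPats *
  pvSideB (cs.filter (fun c => !PySem.Chars.isupper c))
      (PySem.Set.ofList (bs.filter (fun c => !PySem.Chars.isupper c))) pvRightPats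

-- ===== PRECONDITION & SPEC =====
def Spec_seven_segment (lit_seg : String) (broken_seg : String) (out : Int) : Prop := out = seven_segment_alt lit_seg broken_seg
instance (lit_seg : String) (broken_seg : String) (out : Int) : Decidable (Spec_seven_segment lit_seg broken_seg out) := by unfold Spec_seven_segment; infer_instance

-- ===== CLAIM (what is proved, stated in full; the proofs are below) =====
def Claim_equal_seven_segment : Prop := ∀ (lit_seg : String) (broken_seg : String), Dom_seven_segment lit_seg broken_seg → Spec_seven_segment lit_seg broken_seg (seven_segment lit_seg broken_seg)

-- ===== LEMMAS AND PROOFS =====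

-- A's character loop computes the two filters B uses
theorem pvSplitA_go (cs a b : List Char) :
    cs.foldl (fun p c => if PySem.Chars.isupper c then (p.1 ++ [c], p.2) else (p.1, p.2 ++ [c])) (a, b)
      = (a ++ cs.filter (fun c => PySem.Chars.isupper c),
         b ++ cs.filter (fun c => !PySem.Chars.isupper c)) := by
  induction cs generalizing a b with
  | nil => simp
  | cons c cs ih =>
    by_cases h : PySem.Chars.isupper c <;>
      simp [h, ih]

theorem pvSplitA_eq (cs : List Char) :
    pvSplitA cs = (cs.filter (fun c => PySem.Chars.isupper c),
                   cs.filter (fun c => !PySem.Chars.isupper c)) := by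
  simpa [pvSplitA] using pvSplitA_go cs [] []

-- membership in A's chained combinations is exactly being a sublist of the broken string
theorem pv_mem_combs (broken comb : List Char) :
    comb ∈ (List.range (broken.length + 1)).flatMap (fun n => PySem.List.combinations broken n)
      ↔ comb.Sublist broken := by
  constructor
  · rintro h
    obtain ⟨n, -, hc⟩ := List.mem_flatMap.mp h
    exact ((PySem.List.mem_combinations_iff _ _ _).mp hc).1
  · intro h
    exact List.mem_flatMap.mpr ⟨comb.length, List.mem_range.mpr (by
        have := h.length_le; omega),
      (PySem.List.mem_combinations_iff _ _ _).mpr ⟨h, rfl⟩⟩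

-- a strictly increasing pattern P is one of A's generated strings iff the lit segments are
-- duplicate-free, lie in P, and the rest of P lies among the broken segments
theorem pv_mem_gen_iff (lit broken P : List Char) (hP : P.Pairwise (· < ·)) :
    (∃ comb, comb.Sublist broken ∧ PySem.List.sorted (lit ++ comb) (fun c => c) false = P)
      ↔ lit.Nodup ∧ (∀ c ∈ lit, c ∈ P) ∧ (∀ c ∈ P, c ∉ lit → c ∈ broken) := by
  have hPnd : P.Nodup := hP.imp (fun h => ne_of_lt h)
  constructor
  · rintro ⟨comb, hsub, hsort⟩
    have hperm : (lit ++ comb).Perm P := by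
      simpa [hsort] using (PySem.List.sorted_perm (lit ++ comb) (fun c => c) false).symm
    have hnd : (lit ++ comb).Nodup := hperm.nodup_iff.mpr hPnd
    refine ⟨(List.nodup_append.mp hnd).1, ?_, ?_⟩
    · intro c hc
      exact hperm.mem_iff.mp (List.mem_append.mpr (Or.inl hc))
    · intro c hcP hcl
      rcases List.mem_append.mp (hperm.mem_iff.mpr hcP) with h | h
      · exact absurd h hcl
      · exact hsub.subset h
  · rintro ⟨hnd, hlP, hrest⟩
    refine ⟨(broken.dedup.filter (fun c => decide (c ∈ P ∧ c ∉ lit))), ?_, ?_⟩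
    · exact List.Sublist.trans List.filter_sublist broken.dedup_sublist
    · apply PySem.List.sorted_eq_of_perm_of_pairwise_lt _ _ _ _ hP
      apply (List.perm_ext_iff_of_nodup hPnd ?_).mpr ?_
      · refine List.nodup_append.mpr ⟨hnd, List.Nodup.filter _ broken.nodup_dedup, ?_⟩
        intro a ha b hb
        have := List.of_mem_filter hb
        simp at this
        exact fun he => this.2 (he ▸ ha)
      · intro c
        simp only [List.mem_append, List.mem_filter, List.mem_dedup, decide_eq_true_eq]
        constructor
        · intro hcP
          by_cases h : c ∈ lit
          · exact Or.inl h
          · exact Or.inr ⟨hrest c hcP h, by simpa using ⟨hcP, h⟩⟩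
        · rintro (h | ⟨-, h⟩)
          · exact hlP c h
          · simpa using h.1

-- the size of A's intersection counts the patterns that occur among the generated strings
theorem pv_inter_len (s pats : List (List Char))
    (hs : s.Nodup) (hp : pats.Nodup) :
    (PySem.Set.inter s pats).length = pats.countP (fun x => decide (x ∈ s)) := by
  rw [List.countP_eq_length_filter]
  apply List.Perm.length_eq
  apply (List.perm_ext_iff_of_nodup (List.Nodup.filter _ hs) (List.Nodup.filter _ hp)).mpr
  intro x
  simp [List.mem_filter]
  exact and_comm

-- a duplicated lit string has strictly fewer distinct elements
theorem pv_ofList_lt {α : Type} [BEq α] [LawfulBEq α] (xs : List α) (h : ¬ xs.Nodup) :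
    (PySem.Set.ofList xs).length < xs.length := by
  induction xs with
  | nil => exact absurd List.nodup_nil h
  | cons x xs ih =>
    rw [PySem.Set.ofList_cons]
    have hle : (PySem.Set.ofList xs).length ≤ xs.length := PySem.Set.length_ofList_le xs
    by_cases hx : x ∈ xs
    · have hxo : x ∈ PySem.Set.ofList xs := (PySem.Set.mem_ofList _ _).mpr hx
      have : ((PySem.Set.ofList xs).discard x).length < (PySem.Set.ofList xs).length := by
        apply List.length_filter_lt_length_iff_exists.mpr
        exact ⟨x, hxo, by simp⟩
      simp only [List.length_cons]
      omega
    · have hnx : ¬ xs.Nodup := fun hn => h (List.nodup_cons.mpr ⟨hx, hn⟩)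
      have h2 := ih hnx
      have : ((PySem.Set.ofList xs).discard x).length ≤ (PySem.Set.ofList xs).length :=
        List.length_filter_le _ _
      simp only [List.length_cons]
      omega

-- the two per-side computations agree
theorem pv_side_eq (lit broken : List Char) (pats : List (List Char))
    (hp : pats.Nodup) (hlt : ∀ P ∈ pats, P.Pairwise (· < ·)) :
    pvSideA lit broken pats = pvSideB lit (PySem.Set.ofList broken) pats := by
  simp only [pvSideA, pvSideB]
  rw [PySem.Set.ofList_eq_self_of_nodup pats hp]
  rw [pv_inter_len _ _ (PySem.Set.nodup_ofList _) hp]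
  by_cases hnd : lit.Nodup
  · rw [if_neg (by rw [PySem.Set.ofList_eq_self_of_nodup lit hnd]; omega)]
    congr 1
    apply List.countP_congr
    intro P hPmem
    have hPlt := hlt P hPmem
    rw [Bool.eq_iff_iff]
    simp only [decide_eq_true_eq, Bool.and_eq_true, PySem.Set.issubset_iff,
      PySem.Set.mem_ofList, PySem.Set.mem_diff]
    rw [iff_true, List.mem_map]
    constructor
    · rintro ⟨comb, hcmem, hsort⟩
      have := (pv_mem_gen_iff lit broken P hPlt).mp
        ⟨comb, (pv_mem_combs broken comb).mp hcmem, hsort⟩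
      exact ⟨this.2.1, fun x hx => this.2.2 x hx.1 hx.2⟩
    · rintro ⟨h1, h2⟩
      obtain ⟨comb, hsub, hsort⟩ := (pv_mem_gen_iff lit broken P hPlt).mpr
        ⟨hnd, h1, fun c hcP hcl => h2 c ⟨hcP, hcl⟩⟩
      exact ⟨comb, (pv_mem_combs broken comb).mpr hsub, hsort⟩
  · rw [if_pos (pv_ofList_lt lit hnd)]
    rw [List.countP_eq_zero.mpr, Int.natCast_zero]
    intro P hPmem
    simp only [decide_eq_true_eq, PySem.Set.mem_ofList]
    intro hmem
    obtain ⟨comb, hcmem, hsort⟩ := List.mem_map.mp hmem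
    exact hnd ((pv_mem_gen_iff lit broken P (hlt P hPmem)).mp
      ⟨comb, (pv_mem_combs broken comb).mp hcmem, hsort⟩).1

-- ===== VERDICT (by name: the statement is the Claim_ definition above) =====
theorem seven_segment_spec : Claim_equal_seven_segment := by
  intro lit_seg broken_seg _
  unfold Spec_seven_segment seven_segment seven_segment_alt
  rw [pvSplitA_eq, pvSplitA_eq]
  simp only [one_mul]
  rw [pv_side_eq _ _ _ (by decide) (by decide), pv_side_eq _ _ _ (by decide) (by decide)]
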